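-- pv_equiv track=rewrite | github.com/Marwan-65/SecureHub | Ransomeware Detector/antivirus-scanner.py | prioritize_files
-- ===== SOURCE A (Python) =====
-- def prioritize_files(file_list):
--     """Sort files so the most suspicious file types are scanned first"""
--     high_priority = []
--     medium_priority = []
--     low_priority = []
--
--     for file_path in file_list:
--         lower_path = file_path.lower()
--         # High priority: Executables and scripts
--         if any(lower_path.endswith(ext) for ext in ['.exe', '.dll', '.bat', '.cmd', '.ps1', '.vbs', '.js']):
--             high_priority.append(file_path)
--         # Medium priority: Other code files
--         elif any(lower_path.endswith(ext) for ext in ['.py', '.php', '.asp', '.aspx', '.jsp']):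
--             medium_priority.append(file_path)
--         # Low priority: Everything else
--         else:
--             low_priority.append(file_path)
--
--     return high_priority + medium_priority + low_priority
-- ===== SOURCE B (Python) =====
-- HIGH_EXTS = ['.exe', '.dll', '.bat', '.cmd', '.ps1', '.vbs', '.js']
-- MEDIUM_EXTS = ['.py', '.php', '.asp', '.aspx', '.jsp']
--
--
-- def _rank(file_path):
--     lower_path = file_path.lower()
--     if any(lower_path.endswith(ext) for ext in HIGH_EXTS):
--         return 0
--     elif any(lower_path.endswith(ext) for ext in MEDIUM_EXTS):
--         return 1
--     else:
--         return 2
--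
--
-- def prioritize_files(file_list):
--     """Sort files so the most suspicious file types are scanned first"""
--     return sorted(file_list, key=_rank)
-- ===== Notes on version B (the rewrite author's own statement) =====
-- stated objective: simpler
-- what changed: Replaced the three explicit accumulator lists and their concatenation by a single stable sort on a 0/1/2 priority rank (sorted(file_list, key=_rank)); ties keep input order, so the bucket order is reproduced exactly.
import Mathlib
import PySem

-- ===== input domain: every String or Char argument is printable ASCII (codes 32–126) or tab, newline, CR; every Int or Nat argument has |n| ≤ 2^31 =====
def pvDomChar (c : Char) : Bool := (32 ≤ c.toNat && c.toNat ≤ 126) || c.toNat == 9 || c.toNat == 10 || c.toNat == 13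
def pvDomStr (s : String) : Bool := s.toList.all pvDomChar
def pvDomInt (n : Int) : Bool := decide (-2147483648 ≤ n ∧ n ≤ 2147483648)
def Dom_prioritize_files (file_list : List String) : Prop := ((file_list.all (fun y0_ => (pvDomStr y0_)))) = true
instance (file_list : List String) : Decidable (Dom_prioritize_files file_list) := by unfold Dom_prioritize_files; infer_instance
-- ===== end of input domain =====

-- B replaces A's three accumulator lists and concatenation by one stable sort on a 0/1/2
-- priority rank (objective: simpler); same return value on every input.

-- ===== PORT A =====
-- literal port: one loop appending each path to one of three buckets, then concatenation
def prioritize_files (file_list : List String) : List String :=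
  let r := file_list.foldl
    (fun acc file_path =>
      let lower_path := PySem.Str.lower file_path
      if (["" ++ ".exe", ".dll", ".bat", ".cmd", ".ps1", ".vbs", ".js"] : List String).any
           (fun ext => PySem.Str.endswith lower_path ext) then
        (acc.1 ++ [file_path], acc.2.1, acc.2.2)
      else if ([".py", ".php", ".asp", ".aspx", ".jsp"] : List String).any
           (fun ext => PySem.Str.endswith lower_path ext) then
        (acc.1, acc.2.1 ++ [file_path], acc.2.2)
      else
        (acc.1, acc.2.1, acc.2.2 ++ [file_path]))
    (([], [], []) : List String × List String × List String)
  r.1 ++ r.2.1 ++ r.2.2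

-- ===== PORT B =====
def pvHighExts : List String := [".exe", ".dll", ".bat", ".cmd", ".ps1", ".vbs", ".js"]
def pvMediumExts : List String := [".py", ".php", ".asp", ".aspx", ".jsp"]

def pvRank (file_path : String) : Int :=
  let lower_path := PySem.Str.lower file_path
  if pvHighExts.any (fun ext => PySem.Str.endswith lower_path ext) then 0
  else if pvMediumExts.any (fun ext => PySem.Str.endswith lower_path ext) then 1
  else 2

def prioritize_files_alt (file_list : List String) : List String :=
  PySem.List.sorted file_list pvRank

-- ===== PRECONDITION & SPEC =====
def Spec_prioritize_files (file_list : List String) (out : List String) : Prop := out = prioritize_files_alt file_list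
instance (file_list : List String) (out : List String) : Decidable (Spec_prioritize_files file_list out) := by unfold Spec_prioritize_files; infer_instance

-- ===== CLAIM (what is proved, stated in full; the proofs are below) =====
def Claim_equal_prioritize_files : Prop := ∀ (file_list : List String), Dom_prioritize_files file_list → Spec_prioritize_files file_list (prioritize_files file_list)

-- ===== LEMMAS AND PROOFS =====

-- the two Bool tests A performs
def pvC1 (x : String) : Bool :=
  (["" ++ ".exe", ".dll", ".bat", ".cmd", ".ps1", ".vbs", ".js"] : List String).any
    (fun ext => PySem.Str.endswith (PySem.Str.lower x) ext)
def pvC2 (x : String) : Bool :=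
  ([".py", ".php", ".asp", ".aspx", ".jsp"] : List String).any
    (fun ext => PySem.Str.endswith (PySem.Str.lower x) ext)

theorem pvRank_eq (x : String) : pvRank x = if pvC1 x then 0 else if pvC2 x then 1 else 2 := rfl

theorem pvRank_cases (x : String) : pvRank x = 0 ∨ pvRank x = 1 ∨ pvRank x = 2 := by
  rw [pvRank_eq]; split_ifs <;> simp

-- A's loop with generalized accumulators
theorem pvA_inv (xs : List String) :
    ∀ (h m l : List String),
      xs.foldl
        (fun acc file_path =>
          let lower_path := PySem.Str.lower file_path
          if (["" ++ ".exe", ".dll", ".bat", ".cmd", ".ps1", ".vbs", ".js"] : List String).any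
               (fun ext => PySem.Str.endswith lower_path ext) then
            (acc.1 ++ [file_path], acc.2.1, acc.2.2)
          else if ([".py", ".php", ".asp", ".aspx", ".jsp"] : List String).any
               (fun ext => PySem.Str.endswith lower_path ext) then
            (acc.1, acc.2.1 ++ [file_path], acc.2.2)
          else
            (acc.1, acc.2.1, acc.2.2 ++ [file_path])) (h, m, l)
      = (h ++ xs.filter (fun x => pvC1 x),
         m ++ xs.filter (fun x => !pvC1 x && pvC2 x),
         l ++ xs.filter (fun x => !pvC1 x && !pvC2 x)) := by
  have hfun :
      (fun (acc : List String × List String × List String) (file_path : String) =>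
          let lower_path := PySem.Str.lower file_path
          if (["" ++ ".exe", ".dll", ".bat", ".cmd", ".ps1", ".vbs", ".js"] : List String).any
               (fun ext => PySem.Str.endswith lower_path ext) then
            (acc.1 ++ [file_path], acc.2.1, acc.2.2)
          else if ([".py", ".php", ".asp", ".aspx", ".jsp"] : List String).any
               (fun ext => PySem.Str.endswith lower_path ext) then
            (acc.1, acc.2.1 ++ [file_path], acc.2.2)
          else
            (acc.1, acc.2.1, acc.2.2 ++ [file_path]))
      = (fun (acc : List String × List String × List String) (x : String) =>
          if pvC1 x then (acc.1 ++ [x], acc.2.1, acc.2.2)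
          else if pvC2 x then (acc.1, acc.2.1 ++ [x], acc.2.2)
          else (acc.1, acc.2.1, acc.2.2 ++ [x])) := rfl
  rw [hfun]
  induction xs with
  | nil => intro h m l; simp
  | cons x xs ih =>
    intro h m l
    by_cases h1 : pvC1 x
    · simp only [List.foldl_cons, if_pos h1]
      rw [ih]
      simp [h1, List.append_assoc]
    · by_cases h2 : pvC2 x
      · simp only [List.foldl_cons]
        rw [if_neg h1, if_pos h2, ih]
        simp [h1, h2, List.append_assoc]
      · simp only [List.foldl_cons]
        rw [if_neg h1, if_neg h2, ih]
        simp [h1, h2, List.append_assoc]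

-- insertBy facts specific to this proof
theorem pv_insertBy_append {bef : String → String → Bool} {x : String} (ys zs : List String)
    (h : ∀ y ∈ ys, bef x y = false) :
    PySem.List.insertBy bef x (ys ++ zs) = ys ++ PySem.List.insertBy bef x zs := by
  induction ys with
  | nil => simp
  | cons y ys ih =>
    have hy : bef x y = false := h y (by simp)
    simp [PySem.List.insertBy, hy, ih (fun z hz => h z (by simp [hz]))]

theorem pv_insertBy_before_all {bef : String → String → Bool} {x : String} (zs : List String)
    (h : ∀ y ∈ zs, bef x y = true) :
    PySem.List.insertBy bef x zs = x :: zs := by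
  cases zs with
  | nil => simp [PySem.List.insertBy]
  | cons z zs => simp [PySem.List.insertBy, h z (by simp)]

-- the stable insertion sort on a 0/1/2 rank produces the three buckets in order
theorem pvB_inv (xs : List String) :
    ∀ (A B C : List String),
      (∀ a ∈ A, pvRank a = 0) → (∀ b ∈ B, pvRank b = 1) → (∀ c ∈ C, pvRank c = 2) →
      xs.foldl (fun acc x => PySem.List.insertBy (fun a b => decide (pvRank a < pvRank b)) x acc)
        (A ++ B ++ C)
      = (A ++ xs.filter (fun x => decide (pvRank x = 0)))
        ++ (B ++ xs.filter (fun x => decide (pvRank x = 1)))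
        ++ (C ++ xs.filter (fun x => decide (pvRank x = 2))) := by
  induction xs with
  | nil => intro A B C _ _ _; simp
  | cons x xs ih =>
    intro A B C hA hB hC
    rcases pvRank_cases x with hr | hr | hr
    · have step : PySem.List.insertBy (fun a b => decide (pvRank a < pvRank b)) x (A ++ B ++ C)
          = (A ++ [x]) ++ B ++ C := by
        rw [List.append_assoc]
        rw [pv_insertBy_append A (B ++ C) (fun y hy => by simp [hr, hA y hy])]
        rw [pv_insertBy_before_all (B ++ C) (fun y hy => by
          rcases List.mem_append.1 hy with h' | h'
          · simp [hr, hB y h']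
          · simp [hr, hC y h'])]
        simp
      have hA' : ∀ a ∈ A ++ [x], pvRank a = 0 := by
        intro a ha
        rcases List.mem_append.1 ha with h' | h'
        · exact hA a h'
        · simp at h'; subst h'; exact hr
      simp only [List.foldl_cons, step]
      rw [ih (A ++ [x]) B C hA' hB hC]
      simp [hr, List.append_assoc]
    · have step : PySem.List.insertBy (fun a b => decide (pvRank a < pvRank b)) x (A ++ B ++ C)
          = A ++ (B ++ [x]) ++ C := by
        rw [List.append_assoc]
        rw [pv_insertBy_append A (B ++ C) (fun y hy => by simp [hr, hA y hy])]
        rw [pv_insertBy_append B C (fun y hy => by simp [hr, hB y hy])]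
        rw [pv_insertBy_before_all C (fun y hy => by simp [hr, hC y hy])]
        simp
      have hB' : ∀ b ∈ B ++ [x], pvRank b = 1 := by
        intro b hb
        rcases List.mem_append.1 hb with h' | h'
        · exact hB b h'
        · simp at h'; subst h'; exact hr
      simp only [List.foldl_cons, step]
      rw [ih A (B ++ [x]) C hA hB' hC]
      simp [hr, List.append_assoc]
    · have step : PySem.List.insertBy (fun a b => decide (pvRank a < pvRank b)) x (A ++ B ++ C)
          = A ++ B ++ C ++ [x] := by
        apply PySem.List.insertBy_of_forall_not_before
        intro y hy
        rcases List.mem_append.1 hy with h' | h'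
        · rcases List.mem_append.1 h' with h'' | h''
          · simp [hr, hA y h'']
          · simp [hr, hB y h'']
        · simp [hr, hC y h']
      have hC' : ∀ c ∈ C ++ [x], pvRank c = 2 := by
        intro c hc
        rcases List.mem_append.1 hc with h' | h'
        · exact hC c h'
        · simp at h'; subst h'; exact hr
      simp only [List.foldl_cons, step]
      rw [show A ++ B ++ C ++ [x] = A ++ B ++ (C ++ [x]) from by simp [List.append_assoc]]
      rw [ih A B (C ++ [x]) hA hB hC']
      simp [hr, List.append_assoc]

theorem pv_filter0 (xs : List String) :
    xs.filter (fun x => decide (pvRank x = 0)) = xs.filter (fun x => pvC1 x) := by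
  apply List.filter_congr
  intro x _
  rw [pvRank_eq]
  by_cases h1 : pvC1 x <;> by_cases h2 : pvC2 x <;> simp [h1, h2]

theorem pv_filter1 (xs : List String) :
    xs.filter (fun x => decide (pvRank x = 1)) = xs.filter (fun x => !pvC1 x && pvC2 x) := by
  apply List.filter_congr
  intro x _
  rw [pvRank_eq]
  by_cases h1 : pvC1 x <;> by_cases h2 : pvC2 x <;> simp [h1, h2]

theorem pv_filter2 (xs : List String) :
    xs.filter (fun x => decide (pvRank x = 2)) = xs.filter (fun x => !pvC1 x && !pvC2 x) := by
  apply List.filter_congr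
  intro x _
  rw [pvRank_eq]
  by_cases h1 : pvC1 x <;> by_cases h2 : pvC2 x <;> simp [h1, h2]

-- ===== VERDICT (by name: the statement is the Claim_ definition above) =====
theorem prioritize_files_spec : Claim_equal_prioritize_files := by
  intro xs _
  show prioritize_files xs = prioritize_files_alt xs
  rw [prioritize_files, prioritize_files_alt, PySem.List.sorted_eq_foldl_insertBy]
  have hB := pvB_inv xs [] [] [] (by simp) (by simp) (by simp)
  simp only [List.append_nil, List.nil_append] at hB
  rw [hB, pvA_inv xs [] [] []]
  simp only [List.nil_append]
  rw [pv_filter0, pv_filter1, pv_filter2]
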